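-- pv_equiv track=rewrite | github.com/JOGURNAUT/interaction_prediction | model_creation_and_saving.py | feature_extract
-- ===== SOURCE A (Python) =====
-- def feature_extract(kmers, mapping_type, sample_type_features):
--     msu_rep = []
--     sample_feature_dict = dict.fromkeys(sample_type_features, 0)
--
--     for i in range(0, len(kmers)):
--         curr_mer = kmers[i]
--         temp = []
--         for i in range(0, len(curr_mer)):
--             temp.append(mapping_type[curr_mer[i]])
--         msu_rep.append(tuple(temp))
--
--     for i in range(0, len(msu_rep)):
--         if msu_rep[i] in sample_feature_dict.keys():
--             sample_feature_dict[msu_rep[i]] += 1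
--
--     return sample_feature_dict, msu_rep
-- ===== SOURCE B (Python) =====
-- def feature_extract(kmers, mapping_type, sample_type_features):
--     # Map each kmer to its tuple representation (KeyError propagates as in A).
--     msu_rep = [tuple(mapping_type[ch] for ch in kmer) for kmer in kmers]
--     # Key-major: no counting dict at all; each feature's count is a direct scan of msu_rep.
--     return {k: msu_rep.count(k) for k in sample_type_features}, msu_rep
-- ===== Notes on version B (the rewrite author's own statement) =====
-- stated objective: simpler
-- what changed: Removes A's seeded dict and its single counting pass over msu_rep entirely: B is key-major, building the result dict by iterating over sample_type_features and computing each count with a direct msu_rep.count(k) scan (nested scans, no counting accumulator); msu_rep comes from a comprehension instead of indexed loops with append.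
import Mathlib
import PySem

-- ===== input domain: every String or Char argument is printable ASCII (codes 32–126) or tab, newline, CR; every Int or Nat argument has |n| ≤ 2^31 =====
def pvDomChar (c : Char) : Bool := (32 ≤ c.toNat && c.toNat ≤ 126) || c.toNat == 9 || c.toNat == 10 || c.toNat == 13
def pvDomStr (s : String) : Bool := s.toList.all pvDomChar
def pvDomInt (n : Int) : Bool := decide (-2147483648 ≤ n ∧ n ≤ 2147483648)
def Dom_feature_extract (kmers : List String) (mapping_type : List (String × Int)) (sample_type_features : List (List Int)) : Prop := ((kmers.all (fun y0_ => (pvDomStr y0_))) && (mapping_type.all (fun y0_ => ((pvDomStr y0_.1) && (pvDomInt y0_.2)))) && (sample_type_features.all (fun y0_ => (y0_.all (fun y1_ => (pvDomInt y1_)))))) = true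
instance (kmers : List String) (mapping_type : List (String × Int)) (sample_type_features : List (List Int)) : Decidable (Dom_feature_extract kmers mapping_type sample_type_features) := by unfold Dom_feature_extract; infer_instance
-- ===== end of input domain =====

-- B drops A's seeded dict and its counting pass: it is key-major, computing each feature's
-- count by a direct scan (list count) of msu_rep (simpler decomposition; nested scans instead
-- of a one-pass counting dict).


-- ===== PORT A =====
-- mapping_type[curr_mer[i]] raises KeyError when absent; ported as getD 0 and those inputs
-- are excluded by Pre_feature_extract, so the port is exact on admitted inputs.
def feature_extract (kmers : List String) (mapping_type : List (String × Int)) (sample_type_features : List (List Int)) : (List (List Int × Int)) × List (List Int) :=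
  let mt : PySem.Dict String Int := PySem.Dict.mk mapping_type
  -- sample_feature_dict = dict.fromkeys(sample_type_features, 0)
  let sfd0 : PySem.Dict (List Int) Int :=
    sample_type_features.foldl (fun d k => d.insert k 0) PySem.Dict.empty
  -- for i in range(len(kmers)): temp = []; for i in range(len(curr_mer)): temp.append(...)
  let msu_rep : List (List Int) :=
    kmers.foldl (fun acc s =>
      acc ++ [s.toList.foldl (fun t c => t ++ [mt.getD (String.mk [c]) 0]) []]) []
  -- for i in range(len(msu_rep)): if msu_rep[i] in sample_feature_dict.keys(): += 1
  let sfd :=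
    msu_rep.foldl (fun d t => if d.contains t then d.modify t 0 (· + 1) else d) sfd0
  (sfd.items, msu_rep)

-- ===== PORT B =====
def feature_extract_alt (kmers : List String) (mapping_type : List (String × Int)) (sample_type_features : List (List Int)) : (List (List Int × Int)) × List (List Int) :=
  let mt : PySem.Dict String Int := PySem.Dict.mk mapping_type
  -- msu_rep = [tuple(mapping_type[ch] for ch in kmer) for kmer in kmers]
  let msu_rep : List (List Int) :=
    kmers.map (fun s => s.toList.map (fun c => mt.getD (String.mk [c]) 0))
  -- {k: msu_rep.count(k) for k in sample_type_features}
  let res : PySem.Dict (List Int) Int :=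
    sample_type_features.foldl
      (fun d k => d.insert k (PySem.List.count msu_rep k : Int)) PySem.Dict.empty
  (res.items, msu_rep)

-- ===== PRECONDITION & SPEC =====
-- Pre_ excludes exactly the inputs on which A raises KeyError: a kmer containing a
-- character that is not a key of mapping_type.
def Pre_feature_extract (kmers : List String) (mapping_type : List (String × Int)) (sample_type_features : List (List Int)) : Prop :=
  (kmers.all (fun s => s.toList.all (fun c => (PySem.Dict.mk mapping_type).contains (String.mk [c])))) = true
instance (kmers : List String) (mapping_type : List (String × Int)) (sample_type_features : List (List Int)) : Decidable (Pre_feature_extract kmers mapping_type sample_type_features) := by unfold Pre_feature_extract; infer_instance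
def pvWitness_feature_extract : List String × (List (String × Int)) × List (List Int) :=
  (["ab", "ba"], [("a", 1), ("b", 2)], [[1, 2], [3], [1, 2]])

def Spec_feature_extract (kmers : List String) (mapping_type : List (String × Int)) (sample_type_features : List (List Int)) (out : (List (List Int × Int)) × List (List Int)) : Prop := out = feature_extract_alt kmers mapping_type sample_type_features
instance (kmers : List String) (mapping_type : List (String × Int)) (sample_type_features : List (List Int)) (out : (List (List Int × Int)) × List (List Int)) : Decidable (Spec_feature_extract kmers mapping_type sample_type_features out) := by unfold Spec_feature_extract; infer_instance

-- ===== CLAIM (what is proved, stated in full; the proofs are below) =====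
def Claim_equal_feature_extract : Prop := ∀ (kmers : List String) (mapping_type : List (String × Int)) (sample_type_features : List (List Int)), Dom_feature_extract kmers mapping_type sample_type_features → Pre_feature_extract kmers mapping_type sample_type_features → Spec_feature_extract kmers mapping_type sample_type_features (feature_extract kmers mapping_type sample_type_features)

-- ===== LEMMAS AND PROOFS =====

-- A's counting loop leaves the key set untouched (the membership guard).
theorem pv_loop_keys (msu : List (List Int)) (d : PySem.Dict (List Int) Int) :
    (msu.foldl (fun d t => if d.contains t then d.modify t 0 (· + 1) else d) d).keys = d.keys := by
  induction msu generalizing d with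
  | nil => rfl
  | cons t ms ih =>
    simp only [List.foldl_cons]
    by_cases h : d.contains t = true
    · rw [if_pos h, ih, PySem.Dict.keys_modify, PySem.Dict.keys_insert_of_contains d _ h]
    · rw [if_neg h, ih]

-- A's counting loop adds the count of x to keys already present and never touches others.
theorem pv_loop_getD (msu : List (List Int)) (d : PySem.Dict (List Int) Int) (x : List Int) :
    (msu.foldl (fun d t => if d.contains t then d.modify t 0 (· + 1) else d) d).getD x 0
      = d.getD x 0 + (if d.contains x then (msu.count x : Int) else 0) := by
  induction msu generalizing d with
  | nil => simp
  | cons t ms ih =>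
    simp only [List.foldl_cons]
    by_cases h : d.contains t = true
    · rw [if_pos h, ih, PySem.Dict.getD_modify, PySem.Dict.contains_modify]
      by_cases hx : x = t
      · subst hx
        simp only [beq_self_eq_true, Bool.true_or, if_pos, h, List.count_cons]
        push_cast
        ring
      · have hbeq : (x == t) = false := beq_eq_false_iff_ne.mpr hx
        simp only [if_neg hx, hbeq, Bool.false_or]
        have : (t :: ms).count x = ms.count x := by
          have hbt : (t == x) = false := beq_eq_false_iff_ne.mpr (fun he => hx (Eq.symm he))
          simp [List.count_cons, hbt]
        rw [this]
    · rw [if_neg h, ih]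
      by_cases hx : x = t
      · subst hx
        simp [h]
      · have hbeq : (x == t) = false := beq_eq_false_iff_ne.mpr hx
        have : (t :: ms).count x = ms.count x := by
          have hbt : (t == x) = false := beq_eq_false_iff_ne.mpr (fun he => hx (Eq.symm he))
          simp [List.count_cons, hbt]
        rw [this]

-- fromkeys(…, 0) stores 0 everywhere, so its getD with default 0 is 0.
theorem pv_fromkeys_getD (stf : List (List Int)) (d : PySem.Dict (List Int) Int) (x : List Int)
    (hd : d.getD x 0 = 0) :
    (stf.foldl (fun d k => d.insert k 0) d).getD x 0 = 0 := by
  induction stf generalizing d with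
  | nil => exact hd
  | cons k ks ih =>
    simp only [List.foldl_cons]
    refine ih _ ?_
    rw [PySem.Dict.getD_insert]
    split <;> simp [hd]

-- keys not inserted later keep their value through B's comprehension fold.
theorem pv_insert_fold_skip (L : List (List Int)) (g : List Int → Int)
    (d : PySem.Dict (List Int) Int) (x : List Int) (hx : x ∉ L) :
    (L.foldl (fun d k => d.insert k (g k)) d).getD x 0 = d.getD x 0 := by
  induction L generalizing d with
  | nil => rfl
  | cons k ks ih =>
    simp only [List.foldl_cons]
    rw [ih _ (fun h => hx (List.mem_cons_of_mem _ h)), PySem.Dict.getD_insert,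
      if_neg (fun (h : x = k) => hx (h ▸ List.mem_cons_self ..))]

-- B's comprehension over the seed keys: getD of the built dict is the key function.
theorem pv_b_getD (stf : List (List Int)) (g : List Int → Int)
    (d : PySem.Dict (List Int) Int) (x : List Int) (hx : x ∈ stf) :
    (stf.foldl (fun d k => d.insert k (g k)) d).getD x 0 = g x := by
  induction stf generalizing d with
  | nil => cases hx
  | cons k ks ih =>
    simp only [List.foldl_cons]
    by_cases hm : x ∈ ks
    · exact ih _ hm
    · have hk : x = k := by
        rcases List.mem_cons.mp hx with h | h
        · exact h
        · exact absurd h hm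
      subst hk
      rw [pv_insert_fold_skip _ _ _ _ hm, PySem.Dict.getD_insert, if_pos rfl]

theorem feature_extract_eq (kmers : List String) (mapping_type : List (String × Int)) (sample_type_features : List (List Int)) :
    feature_extract kmers mapping_type sample_type_features
      = feature_extract_alt kmers mapping_type sample_type_features := by
  unfold feature_extract feature_extract_alt
  set mt : PySem.Dict String Int := PySem.Dict.mk mapping_type with hmt
  -- the two msu_rep computations agree
  have hmsu :
      kmers.foldl (fun acc s =>
        acc ++ [s.toList.foldl (fun t c => t ++ [mt.getD (String.mk [c]) 0]) []]) []
      = kmers.map (fun s => s.toList.map (fun c => mt.getD (String.mk [c]) 0)) := by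
    rw [PySem.List.foldl_append_singleton_eq_map, List.nil_append]
    exact List.map_congr_left (fun s _ => by
      rw [PySem.List.foldl_append_singleton_eq_map, List.nil_append])
  simp only [hmsu]
  set msu := kmers.map (fun s => s.toList.map (fun c => mt.getD (String.mk [c]) 0)) with hm
  refine congrArg (fun l => (l, msu)) ?_
  -- both dicts have key list Set.ofList sample_type_features
  have hkeys0 :
      ((sample_type_features.foldl (fun d k => d.insert k 0)
        (PySem.Dict.empty : PySem.Dict (List Int) Int)).keys)
      = PySem.Set.ofList sample_type_features := by
    rw [PySem.Dict.keys_foldl_insert (f := fun _ _ => (0 : Int)),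
      PySem.Dict.keys_empty, PySem.Set.ofList_eq_foldl]
    rfl
  have hAkeys :
      ((msu.foldl (fun d t => if d.contains t then d.modify t 0 (· + 1) else d)
        (sample_type_features.foldl (fun d k => d.insert k 0)
          (PySem.Dict.empty : PySem.Dict (List Int) Int))).keys)
      = PySem.Set.ofList sample_type_features :=
    (pv_loop_keys msu _).trans hkeys0
  have hBkeys :
      ((sample_type_features.foldl (fun d k =>
          d.insert k (PySem.List.count msu k : Int))
          (PySem.Dict.empty : PySem.Dict (List Int) Int)).keys)
      = PySem.Set.ofList sample_type_features := by
    have h0 := PySem.Dict.keys_foldl_insert sample_type_features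
      (fun _ k => (PySem.List.count msu k : Int))
      (PySem.Dict.empty : PySem.Dict (List Int) Int)
    rw [PySem.Dict.keys_empty] at h0
    have hupd : PySem.Set.update ([] : List (List Int)) sample_type_features
        = PySem.Set.ofList sample_type_features := by
      rw [PySem.Set.ofList_eq_foldl]; rfl
    exact h0.trans hupd
  have hnd : (PySem.Set.ofList sample_type_features).Nodup := PySem.Set.nodup_ofList _
  rw [PySem.Dict.items_eq_map_keys _ (by rw [hAkeys]; exact hnd) 0,
    PySem.Dict.items_eq_map_keys _ (by rw [hBkeys]; exact hnd) 0, hAkeys, hBkeys]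
  refine List.map_congr_left (fun k hk => ?_)
  have hkmem : k ∈ sample_type_features := (PySem.Set.mem_ofList _ _).mp hk
  have hAc :
      (sample_type_features.foldl (fun d k => d.insert k 0)
        (PySem.Dict.empty : PySem.Dict (List Int) Int)).contains k = true := by
    rw [PySem.Dict.contains_iff_mem_keys, hkeys0]
    exact (PySem.Set.mem_ofList _ _).mpr hkmem
  have hA := pv_loop_getD msu
    (sample_type_features.foldl (fun d k => d.insert k 0)
      (PySem.Dict.empty : PySem.Dict (List Int) Int)) k
  rw [if_pos hAc, pv_fromkeys_getD _ _ _ (PySem.Dict.getD_empty ..), zero_add] at hA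
  have hB := pv_b_getD sample_type_features
    (fun k => (PySem.List.count msu k : Int)) PySem.Dict.empty k hkmem
  rw [hA, hB]
  simp only [PySem.List.count_eq]

-- ===== VERDICT (by name: the statement is the Claim_ definition above) =====
theorem feature_extract_spec : Claim_equal_feature_extract := by
  intro kmers mt stf _ _
  exact feature_extract_eq kmers mt stf
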